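-- pv_equiv track=rewrite | github.com/Amnesia06/Polygon_farm_based_navigation | polygon_navigation_enhanced.py | get_border_blocks_from_set
-- ===== SOURCE A (Python) =====
-- def get_border_blocks_from_set(valid_blocks):
--     """Get border blocks from a set of valid blocks"""
--     border_blocks = []
--
--     for bx, by in valid_blocks:
--         is_border = False
--
--         # Check if any adjacent position is NOT in the valid blocks
--         adjacent_positions = [
--             (bx-1, by), (bx+1, by),  # Left, Right
--             (bx, by-1), (bx, by+1)   # Down, Up
--         ]
--
--         for adj_bx, adj_by in adjacent_positions:
--             if (adj_bx, adj_by) not in valid_blocks: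
--                 is_border = True
--                 break
--
--         if is_border:
--             border_blocks.append((bx, by))
--
--     return border_blocks
-- ===== SOURCE B (Python) =====
-- def get_border_blocks_from_set(valid_blocks):
--     """Get border blocks from a set of valid blocks"""
--     V = set(valid_blocks)
--     interior = V
--     for dx, dy in ((-1, 0), (1, 0), (0, -1), (0, 1)):
--         interior = interior & {(x + dx, y + dy) for (x, y) in V}
--     return [b for b in valid_blocks if b not in interior]
-- ===== Notes on version B (the rewrite author's own statement) =====
-- stated objective: faster
-- what changed: Replaces the per-block scan of 4 neighbours with 'block in list' membership tests by a set-translation algorithm: build set V, intersect it with its four translated copies to get the interior, then filter the original list by non-membership in the interior.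
import Mathlib
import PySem

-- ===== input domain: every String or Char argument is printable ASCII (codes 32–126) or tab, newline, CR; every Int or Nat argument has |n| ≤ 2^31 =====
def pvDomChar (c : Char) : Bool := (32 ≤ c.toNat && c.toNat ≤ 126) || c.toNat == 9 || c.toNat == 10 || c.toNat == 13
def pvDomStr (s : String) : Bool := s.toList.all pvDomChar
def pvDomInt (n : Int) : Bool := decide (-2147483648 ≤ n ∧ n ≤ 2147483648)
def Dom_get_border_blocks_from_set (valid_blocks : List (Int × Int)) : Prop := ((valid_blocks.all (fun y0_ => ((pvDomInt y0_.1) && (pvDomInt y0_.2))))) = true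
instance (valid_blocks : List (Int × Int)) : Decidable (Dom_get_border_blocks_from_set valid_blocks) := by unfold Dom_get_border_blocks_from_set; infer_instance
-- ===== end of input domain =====

-- B replaces A's per-block 4-neighbour scan over the list by intersecting set(valid_blocks)
-- with its four translated copies (the interior) and filtering the input list once (objective: faster).


-- ===== PORT A =====
def get_border_blocks_from_set (valid_blocks : List (Int × Int)) : List (Int × Int) :=
  valid_blocks.foldl (fun border_blocks p =>
    -- for bx, by in valid_blocks
    let bx := p.1
    let by' := p.2
    let adjacent_positions : List (Int × Int) :=
      [(bx - 1, by'), (bx + 1, by'), (bx, by' - 1), (bx, by' + 1)]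
    -- inner loop with break: is_border becomes true iff some adjacent position is not in valid_blocks
    let is_border := adjacent_positions.any (fun q => !(valid_blocks.contains q))
    if is_border then border_blocks ++ [(bx, by')] else border_blocks) []

-- ===== PORT B =====
def get_border_blocks_from_set_alt (valid_blocks : List (Int × Int)) : List (Int × Int) :=
  let V : PySem.Set (Int × Int) := PySem.Set.ofList valid_blocks
  let interior : PySem.Set (Int × Int) :=
    [((-1 : Int), (0 : Int)), (1, 0), (0, -1), (0, 1)].foldl
      (fun interior d =>
        PySem.Set.inter interior
          (PySem.Set.ofList (V.map (fun p => (p.1 + d.1, p.2 + d.2))))) V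
  valid_blocks.filter (fun b => !(PySem.Set.contains interior b))

-- ===== PRECONDITION & SPEC =====
def Spec_get_border_blocks_from_set (valid_blocks : List (Int × Int)) (out : List (Int × Int)) : Prop := out = get_border_blocks_from_set_alt valid_blocks
instance (valid_blocks : List (Int × Int)) (out : List (Int × Int)) : Decidable (Spec_get_border_blocks_from_set valid_blocks out) := by unfold Spec_get_border_blocks_from_set; infer_instance

-- ===== CLAIM (what is proved, stated in full; the proofs are below) =====
def Claim_equal_get_border_blocks_from_set : Prop := ∀ (valid_blocks : List (Int × Int)), Dom_get_border_blocks_from_set valid_blocks → Spec_get_border_blocks_from_set valid_blocks (get_border_blocks_from_set valid_blocks)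

-- ===== LEMMAS AND PROOFS =====

-- membership in a translated copy of the set is membership of the back-translated point
theorem pv_ex (vb : List (Int × Int)) (b : Int × Int) (dx dy : Int) :
    (∃ a ∈ vb, (a.1 + dx, a.2 + dy) = b) ↔ (b.1 - dx, b.2 - dy) ∈ vb := by
  constructor
  · rintro ⟨a, ha, h1⟩
    obtain ⟨e1, e2⟩ := Prod.ext_iff.mp h1
    have e : (b.1 - dx, b.2 - dy) = a := Prod.ext_iff.mpr ⟨by simp at e1 ⊢; omega, by simp at e2 ⊢; omega⟩
    rwa [e]
  · intro h
    exact ⟨(b.1 - dx, b.2 - dy), h, Prod.ext_iff.mpr ⟨by simp, by simp⟩⟩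

theorem pv_pred_eq (valid_blocks : List (Int × Int)) (b : Int × Int) (hb : b ∈ valid_blocks) :
    ([(b.1 - 1, b.2), (b.1 + 1, b.2), (b.1, b.2 - 1), (b.1, b.2 + 1)].any
        (fun q => !(valid_blocks.contains q)))
      =
    (!(PySem.Set.contains
        ([((-1 : Int), (0 : Int)), (1, 0), (0, -1), (0, 1)].foldl
          (fun interior d =>
            PySem.Set.inter interior
              (PySem.Set.ofList ((PySem.Set.ofList valid_blocks).map
                (fun p => (p.1 + d.1, p.2 + d.2))))) (PySem.Set.ofList valid_blocks)) b)) := by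
  rw [Bool.eq_iff_iff]
  simp only [List.foldl, List.any_cons, List.any_nil, Bool.or_eq_true, Bool.not_eq_true',
    List.contains_eq_mem, decide_eq_false_iff_not,
    PySem.Set.contains_eq_listContains, PySem.Set.mem_inter, PySem.Set.mem_ofList,
    List.mem_map, pv_ex, sub_neg_eq_add, sub_zero]
  tauto

-- ===== VERDICT (by name: the statement is the Claim_ definition above) =====
theorem get_border_blocks_from_set_spec : Claim_equal_get_border_blocks_from_set := by
  intro valid_blocks _
  show _ = _
  unfold get_border_blocks_from_set get_border_blocks_from_set_alt
  simp only []
  rw [PySem.List.foldl_append_if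
        (fun p : Int × Int =>
          ([(p.1 - 1, p.2), (p.1 + 1, p.2), (p.1, p.2 - 1), (p.1, p.2 + 1)].any
            (fun q => !(valid_blocks.contains q))))
        (fun p : Int × Int => (p.1, p.2))]
  simp only [List.nil_append]
  rw [show (fun p : Int × Int => (p.1, p.2)) = id from funext fun p => rfl, List.map_id]
  exact List.filter_congr fun b hb => pv_pred_eq valid_blocks b hb
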